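-- pv_equiv track=rewrite | github.com/jhillierdavis/advent-of-code-solutions | aoc-2023/aoc-2023-day-15/solution-in-python3/solution.py | hash_of
-- ===== SOURCE A (Python) =====
-- def hash_of(input):
--     value = 0
--
--     for i in range(len(input)):
--         char = input[i]
--         value += ord(char)
--         value *= 17
--         value = value % 256
--     return value
-- ===== SOURCE B (Python) =====
-- def hash_of(input):
--     n = len(input)
--     return sum(ord(c) * pow(17, n - i, 256) for i, c in enumerate(input)) % 256
-- ===== Notes on version B (the rewrite author's own statement) =====
-- stated objective: alternative
-- what changed: B replaces A's sequential hash recurrence with the closed-form polynomial: the hash equals (sum of ord(c_i)*17^(n-i)) mod 256, computed as an order-independent sum of per-character modular-power terms instead of threading an accumulator through the recurrence.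
import Mathlib
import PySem

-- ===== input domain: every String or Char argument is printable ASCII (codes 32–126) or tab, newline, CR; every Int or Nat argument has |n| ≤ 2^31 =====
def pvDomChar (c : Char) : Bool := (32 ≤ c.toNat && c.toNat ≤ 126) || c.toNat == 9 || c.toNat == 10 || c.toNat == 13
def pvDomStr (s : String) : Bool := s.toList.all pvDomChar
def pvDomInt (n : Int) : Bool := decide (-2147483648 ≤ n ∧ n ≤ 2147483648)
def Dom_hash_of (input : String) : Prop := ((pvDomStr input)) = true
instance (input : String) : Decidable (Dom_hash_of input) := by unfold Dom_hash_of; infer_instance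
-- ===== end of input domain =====

-- B replaces A's sequential recurrence with the closed-form polynomial (Σ ord(c_i)·17^(n-i)) mod 256,
-- an order-independent sum of per-character modular-power terms (alternative algorithm, same result).

-- ===== PORT A =====
-- index loop: for i in range(len(input)): char = input[i]; value += ord(char); value *= 17; value %= 256
def hash_of (input : String) : Int :=
  (PySem.List.pyRange 0 (PySem.Str.len input) 1).foldl
    (fun value i =>
      match PySem.Str.pyGet? input i with
      | some char =>
        let value := value + (char.toNat : Int)
        let value := value * 17
        PySem.Int.mod value 256
      | none => value)  -- unreachable: i ∈ range(len(input))
    0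

-- ===== PORT B =====
-- n = len(input); sum(ord(c) * pow(17, n - i, 256) for i, c in enumerate(input)) % 256
def hash_of_alt (input : String) : Int :=
  let n := PySem.Str.len input
  PySem.Int.mod
    ((PySem.List.enumerate input.toList 0).foldl
      (fun s p => s + (p.2.toNat : Int) * PySem.Int.powMod 17 (n - p.1).toNat 256) 0)
    256

-- ===== PRECONDITION & SPEC =====
def Spec_hash_of (input : String) (out : Int) : Prop := out = hash_of_alt input
instance (input : String) (out : Int) : Decidable (Spec_hash_of input out) := by unfold Spec_hash_of; infer_instance

-- ===== CLAIM (what is proved, stated in full; the proofs are below) =====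
def Claim_equal_hash_of : Prop := ∀ (input : String), Dom_hash_of input → Spec_hash_of input (hash_of input)

-- ===== LEMMAS AND PROOFS =====

-- the closed-form polynomial Σ ord(c_i)·17^(n-i) both sides are reduced to
def polyS : List Char → Int
  | [] => 0
  | c :: l => (c.toNat : Int) * 17 ^ (l.length + 1) + polyS l

theorem emod_absorb_left (a b : Int) : ((a % 256 + b) * 17) % 256 = ((a + b) * 17) % 256 := by
  omega

theorem emod_absorb_term (x c p : Int) : (x + c * (p % 256)) % 256 = (x + c * p) % 256 := by
  conv_lhs => rw [Int.add_emod, Int.mul_emod, Int.emod_emod_of_dvd _ dvd_rfl]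
  conv_rhs => rw [Int.add_emod, Int.mul_emod]

-- folding the index list with lookup equals folding the list itself (A-side loop shape)
theorem foldl_range_getElem? (g : Int → Char → Int) (l : List Char) (acc : Int) :
    (List.range l.length).foldl
      (fun v k => match l[k]? with | some c => g v c | none => v) acc
      = l.foldl g acc := by
  induction l using List.reverseRecOn generalizing acc with
  | nil => simp
  | append_singleton l' c ih =>
    rw [List.length_append, List.length_singleton, List.range_succ, List.foldl_append,
        List.foldl_append]
    have h1 : (List.range l'.length).foldl
        (fun v k => match (l' ++ [c])[k]? with | some x => g v x | none => v) acc
        = (List.range l'.length).foldl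
        (fun v k => match l'[k]? with | some x => g v x | none => v) acc := by
      apply PySem.List.foldl_congr_mem
      intro a k hk
      have hk' : k < l'.length := List.mem_range.mp hk
      rw [List.getElem?_append_left hk']
    rw [h1, ih]
    simp

-- A's recurrence, started at a reduced accumulator, computes the polynomial mod 256
theorem foldA_eq_poly (l : List Char) (acc : Int) :
    l.foldl (fun v c => ((v + (c.toNat : Int)) * 17) % 256) (acc % 256)
      = (acc * 17 ^ l.length + polyS l) % 256 := by
  induction l generalizing acc with
  | nil => simp [polyS]
  | cons c l ih =>
    simp only [List.foldl_cons]
    rw [emod_absorb_left, ih ((acc + (c.toNat : Int)) * 17)]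
    simp only [polyS, List.length_cons, pow_succ]
    ring_nf

-- B's enumerate-sum, taken mod 256, computes the polynomial mod 256
theorem foldB_eq_poly (l : List Char) (s acc : Int) (n : Int) (hn : n = s + l.length) :
    ((PySem.List.enumerate l s).foldl
      (fun a p => a + (p.2.toNat : Int) * PySem.Int.powMod 17 (n - p.1).toNat 256) acc) % 256
      = (acc + polyS l) % 256 := by
  induction l generalizing s acc with
  | nil => simp [PySem.List.enumerate_nil, polyS]
  | cons c l ih =>
    rw [PySem.List.enumerate_cons, List.foldl_cons]
    rw [ih (s + 1) _ (by simp at hn ⊢; omega)]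
    have he : (n - s).toNat = l.length + 1 := by simp at hn; omega
    simp only [he, PySem.Int.powMod_eq,
      PySem.Int.mod_eq_emod_of_pos (show (0:Int) < 256 by norm_num)]
    have h1 : acc + (c.toNat : Int) * (17 ^ (l.length + 1) % 256) + polyS l
        = acc + polyS l + (c.toNat : Int) * (17 ^ (l.length + 1) % 256) := by ring
    rw [h1, emod_absorb_term]
    rw [polyS]
    ring_nf

-- ===== VERDICT (by name: the statement is the Claim_ definition above) =====
theorem hash_of_spec : Claim_equal_hash_of := by
  intro input _
  unfold Spec_hash_of hash_of hash_of_alt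
  -- A side: reduce the index loop to a fold over the characters, then to the polynomial
  rw [PySem.List.pyRange_one]
  have hlen : ((PySem.Str.len input - 0).toNat) = input.toList.length := by
    simp [PySem.Str.len_eq]
  rw [hlen, List.foldl_map]
  have hA : (List.range input.toList.length).foldl
      (fun (value : Int) (k : Nat) => match PySem.Str.pyGet? input (0 + (k : Int)) with
        | some char => ((value + (char.toNat : Int)) * 17) % 256
        | none => value) 0
      = input.toList.foldl (fun v c => ((v + (c.toNat : Int)) * 17) % 256) 0 := by
    rw [← foldl_range_getElem? (fun v c => ((v + (c.toNat : Int)) * 17) % 256) input.toList 0]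
    apply PySem.List.foldl_congr_mem
    intro a k _
    simp
  have hmodA : ∀ v : Int, ∀ c : Char,
      (PySem.Int.mod ((v + (c.toNat : Int)) * 17) 256) = ((v + (c.toNat : Int)) * 17) % 256 :=
    fun v c => PySem.Int.mod_eq_emod_of_pos (by norm_num)
  simp only [hmodA] at hA ⊢
  rw [hA]
  have hAp : input.toList.foldl (fun v c => ((v + (c.toNat : Int)) * 17) % 256) 0
      = polyS input.toList % 256 := by
    have := foldA_eq_poly input.toList 0
    norm_num at this
    simpa using this
  rw [hAp]
  -- B side
  rw [PySem.Int.mod_eq_emod_of_pos (by norm_num)]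
  rw [foldB_eq_poly input.toList 0 0 (PySem.Str.len input) (by simp [PySem.Str.len_eq])]
  norm_num
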